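-- pv_equiv track=rewrite | github.com/rustem17/lie_truth_probing | generate_datasets/spontaneous/build_pairs.py | best_pair
-- ===== SOURCE A (Python) =====
-- def best_pair(responses, answers, gt, max_diff):
--     correct_idxs = [i for i, a in enumerate(answers) if a == gt]
--     incorrect_idxs = [i for i, a in enumerate(answers) if a != gt]
--     best, best_d = None, float("inf")
--     for ci in correct_idxs:
--         for ii in incorrect_idxs:
--             d = abs(len(responses[ci]) - len(responses[ii]))
--             if d < best_d:
--                 best_d = d
--                 best = (ci, ii)
--     if best is None or best_d > max_diff:
--         return None
--     return best
-- ===== SOURCE B (Python) =====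
-- def best_pair(responses, answers, gt, max_diff):
--     cor, inc = [], []
--     for i, a in enumerate(answers):
--         (cor if a == gt else inc).append(i)
--     if not cor or not inc:
--         return None
--     # smallest incorrect index for each response length
--     first_at = {}
--     for i in inc:
--         L = len(responses[i])
--         if L not in first_at:
--             first_at[L] = i
--     lens = sorted(first_at)          # distinct incorrect lengths, increasing
--     best = None
--     for ci in cor:
--         Lc = len(responses[ci])
--         # binary search: leftmost position with lens[lo] >= Lc
--         lo, hi = 0, len(lens)
--         while lo < hi:
--             mid = (lo + hi) // 2
--             if lens[mid] < Lc:
--                 lo = mid + 1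
--             else:
--                 hi = mid
--         cand = None
--         if lo < len(lens):
--             cand = (lens[lo] - Lc, first_at[lens[lo]])
--         if lo > 0:
--             below = (Lc - lens[lo - 1], first_at[lens[lo - 1]])
--             if cand is None or below < cand:
--                 cand = below
--         t = (cand[0], ci, cand[1])
--         if best is None or t < best:
--             best = t
--     return (best[1], best[2]) if best[0] <= max_diff else None
-- ===== Notes on version B (the rewrite author's own statement) =====
-- stated objective: alternative
-- what changed: B replaces A's all-pairs scan by indexing the incorrect side once (dict length->first index, sorted distinct lengths) and binary-searching the nearest length per correct index, with ties resolved by tuple order; a proof shows this predecessor/successor candidate set realizes A's lexicographic minimum of (diff, ci, ii).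
import Mathlib
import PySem

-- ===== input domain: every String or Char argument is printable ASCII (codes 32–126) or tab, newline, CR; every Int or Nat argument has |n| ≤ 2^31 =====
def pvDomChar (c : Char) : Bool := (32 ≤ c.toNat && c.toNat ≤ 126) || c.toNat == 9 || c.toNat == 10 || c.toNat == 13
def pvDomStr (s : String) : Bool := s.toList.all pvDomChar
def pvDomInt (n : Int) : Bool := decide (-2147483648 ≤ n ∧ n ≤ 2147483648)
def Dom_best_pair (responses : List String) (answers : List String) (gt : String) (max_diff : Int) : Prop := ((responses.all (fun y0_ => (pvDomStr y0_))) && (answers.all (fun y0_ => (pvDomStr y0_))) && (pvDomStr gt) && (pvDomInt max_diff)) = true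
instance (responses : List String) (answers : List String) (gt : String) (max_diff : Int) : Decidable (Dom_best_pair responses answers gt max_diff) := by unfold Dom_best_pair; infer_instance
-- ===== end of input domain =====

-- B indexes the incorrect side once (dict length -> first incorrect index, sorted distinct
-- lengths) and binary-searches the nearest length per correct index, instead of A's
-- all-pairs scan; the proof shows the two candidate lengths realize A's lexicographic
-- minimum of (diff, ci, ii).

-- ===== PORT A =====
-- A's `best_d = float('inf')` is modeled as `none : Option Int` (exact: best_d is only ever
-- inf or an int; `d < inf` is always true, and best_d is inf only while best is None).
-- `responses[ci]` is ported as pyGetD with a default that is never read inside Pre_best_pair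
-- (outside it Python raises IndexError).
def best_pair (responses : List String) (answers : List String) (gt : String) (max_diff : Int) : Option (Int × Int) :=
  let correct_idxs : List Int := ((PySem.List.enumerate answers 0).filter (fun p => p.2 == gt)).map (fun p => p.1)
  let incorrect_idxs : List Int := ((PySem.List.enumerate answers 0).filter (fun p => p.2 != gt)).map (fun p => p.1)
  let st := correct_idxs.foldl (fun st ci =>
    incorrect_idxs.foldl (fun st ii =>
      let d : Int := |PySem.Str.len (PySem.List.pyGetD responses ci "") - PySem.Str.len (PySem.List.pyGetD responses ii "")|
      match st.2 with
      | none => (some (ci, ii), some d)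
      | some bd => if d < bd then (some (ci, ii), some d) else st) st)
    ((none : Option (Int × Int)), (none : Option Int))
  match st with
  | (none, _) => none
  | (some best, none) => some best   -- unreachable: best_d is an int whenever best is set
  | (some best, some bd) => if bd > max_diff then none else some best

-- ===== PORT B =====
-- Python's `<` on int 2-tuples resp. 3-tuples: lexicographic comparison.
def pyLt2 (x m : Int × Int) : Bool :=
  decide (x.1 < m.1) || (x.1 == m.1 && decide (x.2 < m.2))

def pyLt3 (x m : Int × Int × Int) : Bool :=
  decide (x.1 < m.1) || (x.1 == m.1 && (decide (x.2.1 < m.2.1) || (x.2.1 == m.2.1 && decide (x.2.2 < m.2.2))))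

-- Source B's hand-written `while lo < hi` binary search (lens[mid] is in range whenever read;
-- pyGetD's default is never read).
def bsearch (lens : List Int) (Lc : Int) (lo hi : Int) : Int :=
  if h : lo < hi then
    if PySem.List.pyGetD lens (PySem.Int.floordiv (lo + hi) 2) 0 < Lc then
      bsearch lens Lc (PySem.Int.floordiv (lo + hi) 2 + 1) hi
    else
      bsearch lens Lc lo (PySem.Int.floordiv (lo + hi) 2)
  else lo
termination_by (hi - lo).toNat
decreasing_by
  · have hb := PySem.Int.floordiv_two_mid_bounds (le_of_lt h)
    omega
  · have hb : PySem.Int.floordiv (lo + hi) 2 < hi :=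
      (PySem.Int.floordiv_lt_iff_lt_mul (by norm_num)).mpr (by omega)
    omega

-- Source B's candidate for one correct length Lc: the successor length lens[lo] and the
-- predecessor length lens[lo-1], tie-broken by tuple comparison (first_at[·] is ported as
-- getD with a default that is never read: the looked-up lengths are keys by construction).
def pvCand (lens : List Int) (first_at : PySem.Dict Int Int) (Lc : Int) : Option (Int × Int) :=
  let lo := bsearch lens Lc 0 (lens.length : Int)
  let cand : Option (Int × Int) :=
    if lo < (lens.length : Int) then
      some (PySem.List.pyGetD lens lo 0 - Lc, first_at.getD (PySem.List.pyGetD lens lo 0) 0)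
    else none
  if 0 < lo then
    let below : Int × Int :=
      (Lc - PySem.List.pyGetD lens (lo - 1) 0, first_at.getD (PySem.List.pyGetD lens (lo - 1) 0) 0)
    match cand with
    | none => some below
    | some c => if pyLt2 below c then some below else some c
  else cand

def best_pair_alt (responses : List String) (answers : List String) (gt : String) (max_diff : Int) : Option (Int × Int) :=
  let p := (PySem.List.enumerate answers 0).foldl
    (fun (p : List Int × List Int) q =>
      if q.2 == gt then (p.1 ++ [q.1], p.2) else (p.1, p.2 ++ [q.1])) ([], [])
  if p.1 = [] ∨ p.2 = [] then none
  else
    let first_at := p.2.foldl (fun (d : PySem.Dict Int Int) i =>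
      if d.contains (PySem.Str.len (PySem.List.pyGetD responses i "")) then d
      else d.insert (PySem.Str.len (PySem.List.pyGetD responses i "")) i) PySem.Dict.empty
    let lens := PySem.List.sorted first_at.keys (fun x => x) false
    let best := p.1.foldl (fun (b : Option (Int × Int × Int)) ci =>
      match pvCand lens first_at (PySem.Str.len (PySem.List.pyGetD responses ci "")), b with
      | none, b => b            -- unreachable: lens ≠ [] forces the candidate to exist
      | some c, none => some (c.1, ci, c.2)
      | some c, some bb => if pyLt3 (c.1, ci, c.2) bb then some (c.1, ci, c.2) else some bb) none
    match best with
    | none => none              -- unreachable: the correct index list is nonempty here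
    | some b => if b.1 ≤ max_diff then some (b.2.1, b.2.2) else none

-- ===== PRECONDITION & SPEC =====
-- Pre_ excludes exactly the inputs where Python A raises IndexError: both a correct and an
-- incorrect answer exist (so the loop body runs) while answers is longer than responses.
def Pre_best_pair (responses : List String) (answers : List String) (gt : String) (max_diff : Int) : Prop :=
  (answers.all (fun a => a == gt)) = true ∨ (answers.all (fun a => a != gt)) = true ∨ answers.length ≤ responses.length
instance (responses : List String) (answers : List String) (gt : String) (max_diff : Int) : Decidable (Pre_best_pair responses answers gt max_diff) := by unfold Pre_best_pair; infer_instance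

def pvWitness_best_pair : List String × List String × String × Int := (["ab", "c"], ["x", "y"], "x", 5)

def Spec_best_pair (responses : List String) (answers : List String) (gt : String) (max_diff : Int) (out : Option (Int × Int)) : Prop := out = best_pair_alt responses answers gt max_diff
instance (responses : List String) (answers : List String) (gt : String) (max_diff : Int) (out : Option (Int × Int)) : Decidable (Spec_best_pair responses answers gt max_diff out) := by unfold Spec_best_pair; infer_instance

-- ===== CLAIM (what is proved, stated in full; the proofs are below) =====
def Claim_equal_best_pair : Prop := ∀ (responses : List String) (answers : List String) (gt : String) (max_diff : Int), Dom_best_pair responses answers gt max_diff → Pre_best_pair responses answers gt max_diff → Spec_best_pair responses answers gt max_diff (best_pair responses answers gt max_diff)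

-- ===== LEMMAS AND PROOFS =====

-- strict lexicographic order on (Int × Int): the order in which A's nested loop produces pairs
def pvLexLt (p q : Int × Int) : Prop := p.1 < q.1 ∨ (p.1 = q.1 ∧ p.2 < q.2)

theorem pyLt2_iff (x m : Int × Int) :
    pyLt2 x m = true ↔ x.1 < m.1 ∨ (x.1 = m.1 ∧ x.2 < m.2) := by
  simp [pyLt2, Bool.or_eq_true, Bool.and_eq_true, decide_eq_true_eq, beq_iff_eq]

theorem pyLt3_iff (x m : Int × Int × Int) :
    pyLt3 x m = true ↔ x.1 < m.1 ∨ (x.1 = m.1 ∧ (x.2.1 < m.2.1 ∨ (x.2.1 = m.2.1 ∧ x.2.2 < m.2.2))) := by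
  simp [pyLt3, Bool.or_eq_true, Bool.and_eq_true, decide_eq_true_eq, beq_iff_eq]

theorem pyLt2_false_trans (a b c : Int × Int)
    (h1 : pyLt2 a b = false) (h2 : pyLt2 b c = false) : pyLt2 a c = false := by
  rw [Bool.eq_false_iff, Ne, pyLt2_iff] at h1 h2 ⊢
  obtain ⟨a1, a2⟩ := a; obtain ⟨b1, b2⟩ := b; obtain ⟨c1, c2⟩ := c
  simp only at h1 h2 ⊢
  omega

theorem pyLt2_false_of_true_of_false (a b c : Int × Int)
    (h1 : pyLt2 b c = true) (h2 : pyLt2 a c = false) : pyLt2 a b = false := by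
  rw [pyLt2_iff] at h1
  rw [Bool.eq_false_iff, Ne, pyLt2_iff] at h2 ⊢
  obtain ⟨a1, a2⟩ := a; obtain ⟨b1, b2⟩ := b; obtain ⟨c1, c2⟩ := c
  simp only at h1 h2 ⊢
  omega

theorem pyLt3_of_pyLt2_mid (d1 i1 d2 i2 c : Int) :
    pyLt3 (d1, c, i1) (d2, c, i2) = pyLt2 (d1, i1) (d2, i2) := by
  simp [pyLt3, pyLt2]

theorem pyLt3_false_of_lt_of_false (a b c : Int × Int × Int)
    (h1 : pyLt3 b a = true) (h2 : pyLt3 b c = false) : pyLt3 a c = false := by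
  rw [pyLt3_iff] at h1
  rw [Bool.eq_false_iff, Ne, pyLt3_iff] at h2 ⊢
  obtain ⟨a1, a2, a3⟩ := a; obtain ⟨b1, b2, b3⟩ := b; obtain ⟨c1, c2, c3⟩ := c
  simp only at h1 h2 ⊢
  omega

-- running minimum: the fold with pyLt3 keeps a minimal element
theorem foldl_min_mem3 (l : List (Int × Int × Int)) (m0 : Int × Int × Int) :
    l.foldl (fun m x => if pyLt3 x m then x else m) m0 = m0 ∨
    l.foldl (fun m x => if pyLt3 x m then x else m) m0 ∈ l := by
  induction l generalizing m0 with
  | nil => left; rfl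
  | cons h t ih =>
    simp only [List.foldl_cons]
    rcases ih (if pyLt3 h m0 then h else m0) with hc | hc
    · rw [hc]; by_cases hb : pyLt3 h m0 = true
      · simp [hb]
      · simp [hb]
    · right; simp [hc]

theorem pyLt3_false_trans (a b c : Int × Int × Int)
    (h1 : pyLt3 a b = false) (h2 : pyLt3 b c = false) : pyLt3 a c = false := by
  rw [Bool.eq_false_iff, Ne, pyLt3_iff] at h1 h2 ⊢
  obtain ⟨a1, a2, a3⟩ := a; obtain ⟨b1, b2, b3⟩ := b; obtain ⟨c1, c2, c3⟩ := c
  simp only at h1 h2 ⊢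
  omega

theorem pyLt3_irrefl (a : Int × Int × Int) : pyLt3 a a = false := by
  rw [Bool.eq_false_iff, Ne, pyLt3_iff]
  obtain ⟨a1, a2, a3⟩ := a
  simp only
  omega

theorem foldl_min_isMin3 (l : List (Int × Int × Int)) :
    ∀ (m0 x : Int × Int × Int), (x = m0 ∨ x ∈ l) →
    pyLt3 x (l.foldl (fun m x => if pyLt3 x m then x else m) m0) = false := by
  induction l with
  | nil =>
    intro m0 x hx
    rcases hx with h | h
    · rw [h]; exact pyLt3_irrefl m0
    · simp at h
  | cons h t ih =>
    intro m0 x hx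
    simp only [List.foldl_cons]
    have hr : pyLt3 (if pyLt3 h m0 then h else m0)
        (t.foldl (fun m x => if pyLt3 x m then x else m) (if pyLt3 h m0 then h else m0)) = false :=
      ih _ _ (Or.inl rfl)
    rcases hx with hx | hx
    · by_cases hb : pyLt3 h m0 = true
      · rw [if_pos hb] at hr ⊢
        exact pyLt3_false_of_lt_of_false x h _ (hx ▸ hb) hr
      · rw [if_neg hb] at hr ⊢
        exact hx ▸ hr
    · rcases List.mem_cons.mp hx with hx | hx
      · by_cases hb : pyLt3 h m0 = true
        · rw [if_pos hb] at hr ⊢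
          exact hx ▸ hr
        · rw [if_neg hb] at hr ⊢
          exact pyLt3_false_trans x m0 _ (hx ▸ (Bool.eq_false_iff.mpr hb)) hr
      · exact ih _ x (Or.inr hx)

theorem pyLt3_antisymm_eq (x y : Int × Int × Int)
    (h1 : pyLt3 x y = false) (h2 : pyLt3 y x = false) : x = y := by
  rw [Bool.eq_false_iff, Ne, pyLt3_iff] at h1 h2
  obtain ⟨a1, b1, c1⟩ := x
  obtain ⟨a2, b2, c2⟩ := y
  simp only at h1 h2
  simp only [Prod.mk.injEq]
  omega

-- B's partition fold computes the two filtered index lists of A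
theorem partition_fold_eq (gt : String) (E : List (Int × String)) (acc : List Int × List Int) :
    E.foldl (fun (p : List Int × List Int) q =>
      if q.2 == gt then (p.1 ++ [q.1], p.2) else (p.1, p.2 ++ [q.1])) acc =
    (acc.1 ++ (E.filter (fun q => q.2 == gt)).map (fun q => q.1),
     acc.2 ++ (E.filter (fun q => q.2 != gt)).map (fun q => q.1)) := by
  induction E generalizing acc with
  | nil => simp
  | cons h t ih =>
    rw [List.foldl_cons, List.filter_cons, List.filter_cons]
    by_cases hb : (h.2 == gt) = true
    · have hb2 : (h.2 != gt) = false := by simp [bne, hb]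
      rw [if_pos hb, ih]
      simp [hb, hb2]
    · have hb1 : (h.2 == gt) = false := Bool.eq_false_iff.mpr hb
      have hb2 : (h.2 != gt) = true := by simp [bne, hb1]
      rw [if_neg hb, ih]
      simp [hb1, hb2]

-- A's nested loop, flattened to a fold over the pair list
theorem foldl_flatMap_pairs {σ : Type} (cor inc : List Int) (G : σ → Int × Int → σ) (st : σ) :
    (cor.flatMap (fun c => inc.map (fun i => (c, i)))).foldl G st =
    cor.foldl (fun st c => inc.foldl (fun st i => G st (c, i)) st) st := by
  induction cor generalizing st with
  | nil => rfl
  | cons c cs ih => simp [List.foldl_append, List.foldl_map, ih]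

-- projection from the running-min state to A's (best, best_d) state
def pvProj (a : Option (Int × Int × Int)) : Option (Int × Int) × Option Int :=
  match a with
  | none => (none, none)
  | some m => (some (m.2.1, m.2.2), some m.1)

-- one step of A's strict-improvement loop (body of the inner for)
def pvStepA (D : Int → Int → Int) (st : Option (Int × Int) × Option Int) (p : Int × Int) :
    Option (Int × Int) × Option Int :=
  match st.2 with
  | none => (some p, some (D p.1 p.2))
  | some bd => if D p.1 p.2 < bd then (some p, some (D p.1 p.2)) else st

-- one step of the running lexicographic minimum over (D, c, i) triples
def pvStepM (D : Int → Int → Int) (a : Option (Int × Int × Int)) (p : Int × Int) :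
    Option (Int × Int × Int) :=
  match a with
  | none => some (D p.1 p.2, p.1, p.2)
  | some m => some (if pyLt3 (D p.1 p.2, p.1, p.2) m then (D p.1 p.2, p.1, p.2) else m)

-- strict lex order on pairs, as produced by A's nested loop
theorem pvStep_comm (D : Int → Int → Int) (acc : Option (Int × Int × Int)) (p : Int × Int)
    (hacc : ∀ m, acc = some m → pvLexLt (m.2.1, m.2.2) p) :
    pvStepA D (pvProj acc) p = pvProj (pvStepM D acc p) := by
  cases acc with
  | none => rfl
  | some m =>
    have hbnd : pvLexLt (m.2.1, m.2.2) p := hacc m rfl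
    show (if D p.1 p.2 < m.1 then (some p, some (D p.1 p.2)) else (some (m.2.1, m.2.2), some m.1)) =
      pvProj (some (if pyLt3 (D p.1 p.2, p.1, p.2) m then (D p.1 p.2, p.1, p.2) else m))
    by_cases hd : D p.1 p.2 < m.1
    · rw [if_pos hd, if_pos ((pyLt3_iff _ _).mpr (Or.inl hd))]
      rfl
    · have hlt : pyLt3 (D p.1 p.2, p.1, p.2) m = false := by
        rw [Bool.eq_false_iff, Ne, pyLt3_iff]
        intro hc
        rcases hbnd with h | ⟨h1, h2⟩ <;> rcases hc with h' | ⟨h1', h2'⟩ <;> simp_all <;> omega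
      rw [if_neg hd, hlt]
      rfl

-- the pair list of a nested loop over two strictly increasing index lists is strictly
-- lexicographically increasing
theorem pairwise_lex_flatMap (cor inc : List Int)
    (hc : cor.Pairwise (· < ·)) (hi : inc.Pairwise (· < ·)) :
    (cor.flatMap (fun c => inc.map (fun i => (c, i)))).Pairwise pvLexLt := by
  induction cor with
  | nil => simp
  | cons c cs ih =>
    have hc' := List.pairwise_cons.mp hc
    simp only [List.flatMap_cons]
    rw [List.pairwise_append]
    refine ⟨?_, ih hc'.2, ?_⟩
    · rw [List.pairwise_map]
      exact hi.imp (fun h => Or.inr ⟨rfl, h⟩)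
    · intro x hx y hy
      rcases List.mem_map.mp hx with ⟨i, _, rfl⟩
      rcases List.mem_flatMap.mp hy with ⟨c', hc'', hy'⟩
      rcases List.mem_map.mp hy' with ⟨i', _, rfl⟩
      exact Or.inl (hc'.1 c' hc'')

-- A's strict-improvement fold over a lexicographically increasing pair list computes
-- (the projection of) the running lexicographic minimum of the (D, c, i) triples
theorem foldA_eq_foldMin (D : Int → Int → Int) (l : List (Int × Int)) (acc : Option (Int × Int × Int))
    (hl : l.Pairwise pvLexLt)
    (hacc : ∀ p ∈ l, ∀ m, acc = some m → pvLexLt (m.2.1, m.2.2) p) :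
    l.foldl (pvStepA D) (pvProj acc) = pvProj (l.foldl (pvStepM D) acc) := by
  induction l generalizing acc with
  | nil => rfl
  | cons p t ih =>
    have hl' := List.pairwise_cons.mp hl
    rw [List.foldl_cons, List.foldl_cons, pvStep_comm D acc p (fun m hm => hacc p List.mem_cons_self m hm)]
    refine ih _ hl'.2 ?_
    intro q hq m' hm'
    cases acc with
    | none =>
      simp only [pvStepM] at hm'
      cases hm'
      exact hl'.1 q hq
    | some m =>
      simp only [pvStepM] at hm'
      by_cases hb : pyLt3 (D p.1 p.2, p.1, p.2) m = true
      · rw [if_pos hb] at hm'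
        cases hm'
        exact hl'.1 q hq
      · rw [if_neg hb] at hm'
        cases hm'
        exact hacc q (List.mem_cons_of_mem _ hq) m' rfl

-- folding the Option-accumulated minimum from `some t0` is the plain running minimum
theorem foldMin_some (D : Int → Int → Int) (l : List (Int × Int)) (t0 : Int × Int × Int) :
    l.foldl (pvStepM D) (some t0) =
    some ((l.map (fun p => (D p.1 p.2, p.1, p.2))).foldl (fun m x => if pyLt3 x m then x else m) t0) := by
  induction l generalizing t0 with
  | nil => rfl
  | cons p t ih => simp only [List.foldl_cons, List.map_cons, pvStepM]; rw [ih]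

-- ---- B-side lemmas ----

-- the first_at dict looks up the FIRST incorrect index with a given length
theorem firstat_get (LF : Int → Int) : ∀ (inc : List Int) (d : PySem.Dict Int Int) (ℓ : Int),
    (inc.foldl (fun d i => if d.contains (LF i) then d else d.insert (LF i) i) d).get? ℓ
    = match d.get? ℓ with
      | some v => some v
      | none => inc.find? (fun i => LF i == ℓ) := by
  intro inc
  induction inc with
  | nil => intro d ℓ; cases hd : d.get? ℓ <;> simp [List.foldl_nil, hd]
  | cons i t ih =>
    intro d ℓ
    rw [List.foldl_cons, List.find?_cons]
    by_cases hc : d.contains (LF i) = true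
    · rw [if_pos hc, ih]
      cases hd : d.get? ℓ with
      | some v => rfl
      | none =>
        have hb : (LF i == ℓ) = false := by
          rw [beq_eq_false_iff_ne]
          intro hle
          rw [PySem.Dict.contains_eq_isSome_get?] at hc
          rw [hle, hd] at hc
          simp at hc
        rw [hb]
    · rw [if_neg hc, ih]
      by_cases hb : (LF i == ℓ) = true
      · have hle : LF i = ℓ := beq_iff_eq.mp hb
        have hd : d.get? ℓ = none := by
          rw [PySem.Dict.contains_eq_isSome_get?, hle] at hc
          cases hd : d.get? ℓ
          · rfl
          · rw [hd] at hc; simp at hc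
        rw [hle, PySem.Dict.get?_insert_self, hd]
        simp
      · have hne : ℓ ≠ LF i := fun h => hb (beq_iff_eq.mpr h.symm)
        rw [PySem.Dict.get?_insert_of_ne d i hne]
        cases hd2 : d.get? ℓ <;> simp [Bool.eq_false_iff.mpr hb]

theorem firstat_nodup (LF : Int → Int) : ∀ (inc : List Int) (d : PySem.Dict Int Int),
    d.keys.Nodup →
    (inc.foldl (fun d i => if d.contains (LF i) then d else d.insert (LF i) i) d).keys.Nodup := by
  intro inc
  induction inc with
  | nil => intro d hd; exact hd
  | cons i t ih =>
    intro d hd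
    rw [List.foldl_cons]
    by_cases hc : d.contains (LF i) = true
    · rw [if_pos hc]; exact ih d hd
    · rw [if_neg hc]; exact ih _ (PySem.Dict.nodup_keys_insert d (LF i) i hd)

-- find? on a strictly increasing list returns the least element satisfying the predicate
theorem find?_min (p : Int → Bool) : ∀ (l : List Int), l.Pairwise (· < ·) →
    ∀ j, l.find? p = some j → ∀ i ∈ l, p i = true → j ≤ i := by
  intro l
  induction l with
  | nil => intro _ j hj; simp at hj
  | cons a t ih =>
    intro hpw j hj i hi hpi
    have hpw' := List.pairwise_cons.mp hpw
    rw [List.find?_cons] at hj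
    by_cases ha : p a = true
    · rw [ha] at hj
      cases hj
      rcases List.mem_cons.mp hi with rfl | hi
      · exact le_refl _
      · exact le_of_lt (hpw'.1 i hi)
    · rw [Bool.eq_false_iff.mpr ha] at hj
      rcases List.mem_cons.mp hi with rfl | hi
      · exact absurd hpi ha
      · exact ih hpw'.2 j hj i hi hpi

-- binary-search invariant: bsearch returns the leftmost position whose value is ≥ Lc
theorem bsearch_spec (lens : List Int) (Lc : Int)
    (hmono : ∀ p q : Nat, p ≤ q → q < lens.length → lens.getD p 0 ≤ lens.getD q 0) :
    ∀ (n : Nat) (lo hi : Int), (hi - lo).toNat ≤ n →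
    0 ≤ lo → lo ≤ hi → hi ≤ (lens.length : Int) →
    (∀ k : Nat, (k : Int) < lo → lens.getD k 0 < Lc) →
    (∀ k : Nat, hi ≤ (k : Int) → k < lens.length → Lc ≤ lens.getD k 0) →
    lo ≤ bsearch lens Lc lo hi ∧ bsearch lens Lc lo hi ≤ hi ∧
    (∀ k : Nat, (k : Int) < bsearch lens Lc lo hi → lens.getD k 0 < Lc) ∧
    (∀ k : Nat, bsearch lens Lc lo hi ≤ (k : Int) → k < lens.length → Lc ≤ lens.getD k 0) := by
  intro n
  induction n with
  | zero =>
    intro lo hi hn h0 hlh hhl Hlo Hhi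
    rw [bsearch, dif_neg (by omega)]
    exact ⟨le_refl _, hlh, Hlo, fun k hk hkl => Hhi k (by omega) hkl⟩
  | succ n ih =>
    intro lo hi hn h0 hlh hhl Hlo Hhi
    rw [bsearch]
    by_cases h : lo < hi
    · rw [dif_pos h]
      have hmid := PySem.Int.floordiv_two_mid_bounds (le_of_lt h)
      have hmidlt : PySem.Int.floordiv (lo + hi) 2 < hi :=
        (PySem.Int.floordiv_lt_iff_lt_mul (by norm_num)).mpr (by omega)
      set mid := PySem.Int.floordiv (lo + hi) 2 with hmdef
      have hG : PySem.List.pyGetD lens mid 0 = lens.getD mid.toNat 0 := by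
        rw [PySem.List.pyGetD_eq_getElem lens 0 (by omega) (by omega)]
        rw [List.getD_eq_getElem lens 0 (by omega)]
      by_cases hlt : PySem.List.pyGetD lens mid 0 < Lc
      · rw [if_pos hlt]
        obtain ⟨h1, h2, h3, h4⟩ := ih (mid + 1) hi (by omega) (by omega) (by omega) hhl (by
          intro k hk
          by_cases hk2 : (k : Int) < lo
          · exact Hlo k hk2
          · have h1 : k ≤ mid.toNat := by omega
            have h2 := hmono k mid.toNat h1 (by omega)
            rw [hG] at hlt
            omega) Hhi
        exact ⟨by omega, h2, h3, h4⟩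
      · rw [if_neg hlt]
        obtain ⟨h1, h2, h3, h4⟩ := ih lo mid (by omega) h0 (by omega) (by omega) Hlo (by
          intro k hk hklen
          have h1 : mid.toNat ≤ k := by omega
          have h2 := hmono mid.toNat k h1 hklen
          rw [hG] at hlt
          omega)
        exact ⟨h1, by omega, h3, h4⟩
    · rw [dif_neg h]
      exact ⟨le_refl _, hlh, Hlo, fun k hk hkl => Hhi k (by omega) hkl⟩

-- the candidate Source B computes for one correct index is the pyLt2-minimum of (diff, ii)
-- over ALL incorrect indices ii
theorem pvCand_spec (L : Int → Int) (inc lens : List Int) (fa : PySem.Dict Int Int)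
    (hmem : ∀ ℓ : Int, ℓ ∈ lens ↔ ∃ i ∈ inc, L i = ℓ)
    (hpw : lens.Pairwise (· < ·))
    (hfa : ∀ ℓ ∈ lens, fa.getD ℓ 0 ∈ inc ∧ L (fa.getD ℓ 0) = ℓ ∧
      ∀ i ∈ inc, L i = ℓ → fa.getD ℓ 0 ≤ i)
    (hne : inc ≠ []) (Lc : Int) :
    ∃ c : Int × Int, pvCand lens fa Lc = some c ∧
      (∃ i ∈ inc, c = (|Lc - L i|, i)) ∧
      ∀ i ∈ inc, pyLt2 (|Lc - L i|, i) c = false := by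
  obtain ⟨i0, hi0⟩ := List.exists_mem_of_ne_nil inc hne
  have hlne : lens ≠ [] := by
    intro h
    have h2 := (hmem (L i0)).mpr ⟨i0, hi0, rfl⟩
    rw [h] at h2
    simp at h2
  have hlen0 : 0 < lens.length := List.length_pos_iff.mpr hlne
  have hmono : ∀ p q : Nat, p ≤ q → q < lens.length → lens.getD p 0 ≤ lens.getD q 0 := by
    intro p q hpq hq
    rcases Nat.eq_or_lt_of_le hpq with rfl | hlt
    · exact le_refl _
    · have h2 := (List.pairwise_iff_getElem.mp hpw) p q (by omega) hq hlt
      rw [List.getD_eq_getElem lens 0 (by omega), List.getD_eq_getElem lens 0 hq]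
      exact le_of_lt h2
  obtain ⟨hr1, hr2, hr3, hr4⟩ := bsearch_spec lens Lc hmono lens.length 0 (lens.length : Int)
    (by omega) (by omega) (by omega) (le_refl _)
    (fun k hk => absurd hk (by omega)) (fun k hk1 hk2 => absurd hk1 (by omega))
  set r := bsearch lens Lc 0 (lens.length : Int) with hrdef
  have hpos : ∀ i ∈ inc, ∃ k : Nat, k < lens.length ∧ lens.getD k 0 = L i := by
    intro i hi
    have hmi : L i ∈ lens := (hmem (L i)).mpr ⟨i, hi, rfl⟩
    obtain ⟨k, hk, he⟩ := List.mem_iff_getElem.mp hmi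
    exact ⟨k, hk, by rw [List.getD_eq_getElem lens 0 hk, he]⟩
  have hmemD : ∀ k : Nat, k < lens.length → lens.getD k 0 ∈ lens := by
    intro k hk
    rw [List.getD_eq_getElem lens 0 hk]
    exact List.getElem_mem hk
  have hlow : ∀ i ∈ inc, L i < Lc → 0 < r ∧ L i ≤ lens.getD (r - 1).toNat 0 := by
    intro i hi hLi
    obtain ⟨k, hk, he⟩ := hpos i hi
    have hkr : (k : Int) < r := by
      by_contra hge
      have h2 := hr4 k (by omega) hk
      omega
    refine ⟨by omega, ?_⟩
    have h2 := hmono k (r - 1).toNat (by omega) (by omega)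
    omega
  have hhigh : ∀ i ∈ inc, Lc ≤ L i → r < (lens.length : Int) ∧ lens.getD r.toNat 0 ≤ L i := by
    intro i hi hLi
    obtain ⟨k, hk, he⟩ := hpos i hi
    have hkr : r ≤ (k : Int) := by
      by_contra hge
      have h2 := hr3 k (by omega)
      omega
    refine ⟨by omega, ?_⟩
    have h2 := hmono r.toNat k (by omega) hk
    omega
  set cpair : Int × Int := (lens.getD r.toNat 0 - Lc, fa.getD (lens.getD r.toNat 0) 0) with hcp
  set bpair : Int × Int := (Lc - lens.getD (r - 1).toNat 0, fa.getD (lens.getD (r - 1).toNat 0) 0) with hbp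
  have hceil : r < (lens.length : Int) →
      (∃ i ∈ inc, cpair = (|Lc - L i|, i)) ∧
      (∀ i ∈ inc, Lc ≤ L i → pyLt2 (|Lc - L i|, i) cpair = false) := by
    intro hlt
    have hl2mem : lens.getD r.toNat 0 ∈ lens := hmemD r.toNat (by omega)
    have hLcle : Lc ≤ lens.getD r.toNat 0 := hr4 r.toNat (by omega) (by omega)
    obtain ⟨hj2inc, hj2len, hj2min⟩ := hfa (lens.getD r.toNat 0) hl2mem
    constructor
    · refine ⟨fa.getD (lens.getD r.toNat 0) 0, hj2inc, ?_⟩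
      have habs : |Lc - L (fa.getD (lens.getD r.toNat 0) 0)| = lens.getD r.toNat 0 - Lc := by
        rw [hj2len, abs_of_nonpos (by omega)]
        ring
      rw [hcp, habs]
    · intro i hi hLc
      have habs : |Lc - L i| = L i - Lc := by
        rw [abs_of_nonpos (by omega)]
        ring
      have hge := (hhigh i hi hLc).2
      rw [Bool.eq_false_iff, Ne, pyLt2_iff]
      intro hcon
      rcases hcon with h | ⟨h1, h2⟩
      · simp only [hcp] at h
        omega
      · simp only [hcp] at h1 h2
        have hLieq : L i = lens.getD r.toNat 0 := by omega
        have h3 := hj2min i hi hLieq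
        omega
  have hbelow : 0 < r →
      (∃ i ∈ inc, bpair = (|Lc - L i|, i)) ∧
      (∀ i ∈ inc, L i < Lc → pyLt2 (|Lc - L i|, i) bpair = false) := by
    intro h0
    have hl1mem : lens.getD (r - 1).toNat 0 ∈ lens := hmemD (r - 1).toNat (by omega)
    have hLclt : lens.getD (r - 1).toNat 0 < Lc := hr3 (r - 1).toNat (by omega)
    obtain ⟨hj1inc, hj1len, hj1min⟩ := hfa (lens.getD (r - 1).toNat 0) hl1mem
    constructor
    · refine ⟨fa.getD (lens.getD (r - 1).toNat 0) 0, hj1inc, ?_⟩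
      have habs : |Lc - L (fa.getD (lens.getD (r - 1).toNat 0) 0)| = Lc - lens.getD (r - 1).toNat 0 := by
        rw [hj1len, abs_of_nonneg (by omega)]
      rw [hbp, habs]
    · intro i hi hLc
      have habs : |Lc - L i| = Lc - L i := abs_of_nonneg (by omega)
      have hge := (hlow i hi hLc).2
      rw [Bool.eq_false_iff, Ne, pyLt2_iff]
      intro hcon
      rcases hcon with h | ⟨h1, h2⟩
      · simp only [hbp] at h
        omega
      · simp only [hbp] at h1 h2
        have hLieq : L i = lens.getD (r - 1).toNat 0 := by omega
        have h3 := hj1min i hi hLieq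
        omega
  have hGr : r < (lens.length : Int) → PySem.List.pyGetD lens r 0 = lens.getD r.toNat 0 := by
    intro h
    rw [PySem.List.pyGetD_eq_getElem lens 0 (by omega) (by omega), List.getD_eq_getElem lens 0 (by omega)]
  have hGr1 : 0 < r → PySem.List.pyGetD lens (r - 1) 0 = lens.getD (r - 1).toNat 0 := by
    intro h
    rw [PySem.List.pyGetD_eq_getElem lens 0 (by omega) (by omega), List.getD_eq_getElem lens 0 (by omega)]
  by_cases hlt : r < (lens.length : Int)
  · by_cases h0 : 0 < r
    · -- both candidates exist: Source B keeps the pyLt2-smaller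
      have hsome : pvCand lens fa Lc =
          (if pyLt2 bpair cpair then some bpair else some cpair) := by
        unfold pvCand
        rw [← hrdef]
        dsimp only
        rw [if_pos hlt, if_pos h0, hGr hlt, hGr1 h0]
      by_cases hbc : pyLt2 bpair cpair = true
      · refine ⟨bpair, by rw [hsome, if_pos hbc], (hbelow h0).1, ?_⟩
        intro i hi
        by_cases hc : L i < Lc
        · exact (hbelow h0).2 i hi hc
        · exact pyLt2_false_of_true_of_false _ _ _ hbc ((hceil hlt).2 i hi (by omega))
      · refine ⟨cpair, by rw [hsome, if_neg hbc], (hceil hlt).1, ?_⟩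
        intro i hi
        by_cases hc : L i < Lc
        · exact pyLt2_false_trans _ _ _ ((hbelow h0).2 i hi hc) (Bool.eq_false_iff.mpr hbc)
        · exact (hceil hlt).2 i hi (by omega)
    · -- r = 0: only the successor candidate exists
      have hsome : pvCand lens fa Lc = some cpair := by
        unfold pvCand
        rw [← hrdef]
        dsimp only
        rw [if_pos hlt, if_neg h0, hGr hlt]
      refine ⟨cpair, hsome, (hceil hlt).1, ?_⟩
      intro i hi
      by_cases hc : L i < Lc
      · exact absurd (hlow i hi hc).1 h0
      · exact (hceil hlt).2 i hi (by omega)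
  · -- r = len: only the predecessor candidate exists
    have h0 : 0 < r := by omega
    have hsome : pvCand lens fa Lc = some bpair := by
      unfold pvCand
      rw [← hrdef]
      dsimp only
      rw [if_neg hlt, if_pos h0, hGr1 h0]
    refine ⟨bpair, hsome, (hbelow h0).1, ?_⟩
    intro i hi
    by_cases hc : L i < Lc
    · exact (hbelow h0).2 i hi hc
    · exact absurd ((hhigh i hi (by omega)).1) hlt

-- B's Option-accumulated fold, with the candidate always present, rewritten to a running
-- pyLt3-minimum over the per-correct-index representative triples
theorem foldB_eq (f : Int → Option (Int × Int)) (g : Int → Int × Int × Int)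
    (hfg : ∀ ci, ∃ c, f ci = some c ∧ g ci = (c.1, ci, c.2)) :
    ∀ (cor : List Int) (b : Option (Int × Int × Int)),
    cor.foldl (fun b ci => match f ci, b with
      | none, b => b
      | some c, none => some (c.1, ci, c.2)
      | some c, some bb => if pyLt3 (c.1, ci, c.2) bb then some (c.1, ci, c.2) else some bb) b
    = cor.foldl (fun b ci => match b with
      | none => some (g ci)
      | some bb => if pyLt3 (g ci) bb then some (g ci) else some bb) b := by
  intro cor
  induction cor with
  | nil => intro b; rfl
  | cons ci t ih =>
    intro b
    obtain ⟨c, hc, hgc⟩ := hfg ci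
    cases b with
    | none => simp only [List.foldl_cons, hc, hgc]; exact ih _
    | some bb => simp only [List.foldl_cons, hc, hgc]; exact ih _

theorem foldOptMin (g : Int → Int × Int × Int) : ∀ (cor : List Int) (t0 : Int × Int × Int),
    cor.foldl (fun b ci => match b with
      | none => some (g ci)
      | some bb => if pyLt3 (g ci) bb then some (g ci) else some bb) (some t0)
    = some ((cor.map g).foldl (fun m x => if pyLt3 x m then x else m) t0) := by
  intro cor
  induction cor with
  | nil => intro t0; rfl
  | cons ci t ih =>
    intro t0
    simp only [List.foldl_cons, List.map_cons]
    rw [← apply_ite some]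
    exact ih (if pyLt3 (g ci) t0 then g ci else t0)

set_option maxHeartbeats 1000000 in
theorem best_pair_eq : ∀ (responses : List String) (answers : List String) (gt : String) (max_diff : Int),
    best_pair responses answers gt max_diff = best_pair_alt responses answers gt max_diff := by
  intro responses answers gt max_diff
  unfold best_pair best_pair_alt
  rw [partition_fold_eq]
  simp only [List.nil_append]
  set E := PySem.List.enumerate answers 0 with hE
  set cor := (E.filter (fun q => q.2 == gt)).map (fun q => q.1) with hcor
  set inc := (E.filter (fun q => q.2 != gt)).map (fun q => q.1) with hinc
  set D : Int → Int → Int := fun c i =>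
    |PySem.Str.len (PySem.List.pyGetD responses c "") - PySem.Str.len (PySem.List.pyGetD responses i "")| with hD
  by_cases hc0 : cor = []
  · simp [hc0]
  by_cases hi0 : inc = []
  · simp only [hi0, List.foldl_nil]
    have hfold : cor.foldl (fun (st : Option (Int × Int) × Option Int) _ => st)
        ((none : Option (Int × Int)), (none : Option Int)) = (none, none) := by
      induction cor with
      | nil => rfl
      | cons c cs ih => exact ih
    rw [hfold]
    simp
  · rw [if_neg (by simp [hc0, hi0])]
    -- ---------- A's side: the nested strict-improvement loop is a running lex minimum ----------
    have hfunA : (fun (st : Option (Int × Int) × Option Int) ci =>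
        inc.foldl (fun st ii =>
          let d : Int := |PySem.Str.len (PySem.List.pyGetD responses ci "") -
            PySem.Str.len (PySem.List.pyGetD responses ii "")|
          match st.2 with
          | none => (some (ci, ii), some d)
          | some bd => if d < bd then (some (ci, ii), some d) else st) st) =
        (fun st ci => inc.foldl (fun st ii => pvStepA D st (ci, ii)) st) := rfl
    rw [hfunA, ← foldl_flatMap_pairs cor inc (pvStepA D)]
    have hpe : E.Pairwise (fun p q => p.1 < q.1) := PySem.List.pairwise_lt_enumerate answers 0
    have hcinc : cor.Pairwise (· < ·) := by
      rw [hcor, List.pairwise_map]; exact (hpe.filter _)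
    have hiinc : inc.Pairwise (· < ·) := by
      rw [hinc, List.pairwise_map]; exact (hpe.filter _)
    set P := cor.flatMap (fun c => inc.map (fun i => (c, i))) with hP
    have hPpw : P.Pairwise pvLexLt := pairwise_lex_flatMap cor inc hcinc hiinc
    have hPne : P ≠ [] := by
      rcases List.exists_cons_of_ne_nil hc0 with ⟨c, cs, hcs⟩
      rcases List.exists_cons_of_ne_nil hi0 with ⟨i, is, his⟩
      rw [hP, hcs, his]; simp
    rcases List.exists_cons_of_ne_nil hPne with ⟨p0, Pt, hPeq⟩
    have hproj : ((none : Option (Int × Int)), (none : Option Int)) = pvProj none := rfl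
    rw [hproj, foldA_eq_foldMin D P none hPpw (fun p _ m hm => by cases hm), hPeq,
      List.foldl_cons]
    have hstep0 : pvStepM D none p0 = some (D p0.1 p0.2, p0.1, p0.2) := rfl
    rw [hstep0, foldMin_some]
    set r_all := ((Pt.map (fun p => (D p.1 p.2, p.1, p.2))).foldl
      (fun m x => if pyLt3 x m then x else m) (D p0.1 p0.2, p0.1, p0.2)) with hrall
    -- ---------- B's side: dict + sorted lengths + binary search ----------
    set LF : Int → Int := fun i => PySem.Str.len (PySem.List.pyGetD responses i "") with hLF
    set fa := inc.foldl (fun (d : PySem.Dict Int Int) i =>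
      if d.contains (PySem.Str.len (PySem.List.pyGetD responses i "")) then d
      else d.insert (PySem.Str.len (PySem.List.pyGetD responses i "")) i) PySem.Dict.empty with hfadef
    set lens := PySem.List.sorted fa.keys (fun x => x) false with hlensdef
    have hget : ∀ ℓ : Int, fa.get? ℓ = inc.find? (fun i => LF i == ℓ) := by
      intro ℓ
      rw [hfadef]
      refine (firstat_get LF inc PySem.Dict.empty ℓ).trans ?_
      rw [PySem.Dict.get?_empty]
    have hnodup : fa.keys.Nodup := by
      rw [hfadef]
      exact firstat_nodup LF inc PySem.Dict.empty PySem.Dict.nodup_keys_empty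
    have hperm : lens.Perm fa.keys := PySem.List.sorted_perm fa.keys (fun x => x) false
    have hmemlens : ∀ ℓ : Int, ℓ ∈ lens ↔ ∃ i ∈ inc, LF i = ℓ := by
      intro ℓ
      rw [hperm.mem_iff, ← PySem.Dict.contains_iff_mem_keys,
        PySem.Dict.contains_eq_isSome_get?, hget ℓ]
      simp [List.find?_isSome, beq_iff_eq]
    have hpwlt : lens.Pairwise (· < ·) := by
      have hle : lens.Pairwise (· ≤ ·) := PySem.List.sorted_pairwise fa.keys (fun x => x)
      have hnd : lens.Nodup := hperm.nodup_iff.mpr hnodup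
      exact (hle.and hnd).imp (fun h => lt_of_le_of_ne h.1 h.2)
    have hfaprop : ∀ ℓ ∈ lens, fa.getD ℓ 0 ∈ inc ∧ LF (fa.getD ℓ 0) = ℓ ∧
        ∀ i ∈ inc, LF i = ℓ → fa.getD ℓ 0 ≤ i := by
      intro ℓ hmem
      obtain ⟨i, hi, hLi⟩ := (hmemlens ℓ).mp hmem
      have hsome : (inc.find? (fun i => LF i == ℓ)).isSome := by
        simp [List.find?_isSome]
        exact ⟨i, hi, hLi⟩
      obtain ⟨j, hj⟩ := Option.isSome_iff_exists.mp hsome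
      have hgd : fa.getD ℓ 0 = j := by
        rw [PySem.Dict.getD_eq_get?_getD, hget ℓ, hj]
        rfl
      have hpj := List.find?_some hj
      simp only [beq_iff_eq] at hpj
      rw [hgd]
      exact ⟨List.mem_of_find?_eq_some hj, hpj,
        fun i hi he => find?_min _ inc hiinc j hj i hi (beq_iff_eq.mpr he)⟩
    have hcand := fun Lc => pvCand_spec LF inc lens fa hmemlens hpwlt hfaprop hi0 Lc
    set g : Int → Int × Int × Int := fun ci =>
      match pvCand lens fa (LF ci) with
      | some c => (c.1, ci, c.2)
      | none => (0, ci, 0) with hg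
    have hfg : ∀ ci, ∃ c, pvCand lens fa (LF ci) = some c ∧ g ci = (c.1, ci, c.2) := by
      intro ci
      obtain ⟨c, hc, _, _⟩ := hcand (LF ci)
      exact ⟨c, hc, by rw [hg]; simp only [hc]⟩
    rw [foldB_eq (fun ci => pvCand lens fa (LF ci)) g hfg cor none]
    rcases List.exists_cons_of_ne_nil hc0 with ⟨c0, rest, hcoreq⟩
    rw [hcoreq, List.foldl_cons]
    have hstepB : (match (none : Option (Int × Int × Int)) with
        | none => some (g c0)
        | some bb => if pyLt3 (g c0) bb then some (g c0) else some bb) = some (g c0) := rfl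
    rw [hstepB, foldOptMin]
    set r_B := ((rest.map g).foldl (fun m x => if pyLt3 x m then x else m) (g c0)) with hrB
    -- ---------- the two minima coincide ----------
    have htriple : ∀ x : Int × Int × Int,
        (x = (D p0.1 p0.2, p0.1, p0.2) ∨ x ∈ Pt.map (fun p => (D p.1 p.2, p.1, p.2))) ↔
        (∃ c ∈ cor, ∃ i ∈ inc, x = (D c i, c, i)) := by
      intro x
      have h1 : (x = (D p0.1 p0.2, p0.1, p0.2) ∨ x ∈ Pt.map (fun p => (D p.1 p.2, p.1, p.2))) ↔
          x ∈ P.map (fun p => (D p.1 p.2, p.1, p.2)) := by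
        rw [hPeq]; simp
      rw [h1]
      constructor
      · intro hx
        rcases List.mem_map.mp hx with ⟨p, hp, rfl⟩
        rcases List.mem_flatMap.mp (hP ▸ hp) with ⟨c, hcm, hp2⟩
        rcases List.mem_map.mp hp2 with ⟨i, him, hpi⟩
        subst hpi
        exact ⟨c, hcm, i, him, rfl⟩
      · rintro ⟨c, hcm, i, him, rfl⟩
        refine List.mem_map.mpr ⟨(c, i), ?_, rfl⟩
        rw [hP]
        exact List.mem_flatMap.mpr ⟨c, hcm, List.mem_map.mpr ⟨i, him, rfl⟩⟩
    have hrepmem : ∀ c ∈ cor, ∃ i ∈ inc, g c = (D c i, c, i) := by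
      intro c _
      obtain ⟨cp, hcp, ⟨i, hiinc2, hie⟩, _⟩ := hcand (LF c)
      refine ⟨i, hiinc2, ?_⟩
      rw [hg]
      simp only [hcp, hie]
      rfl
    have hrepmin : ∀ c ∈ cor, ∀ i ∈ inc, pyLt3 (D c i, c, i) (g c) = false := by
      intro c _ i hi
      obtain ⟨⟨cp1, cp2⟩, hcp, _, hmin⟩ := hcand (LF c)
      have hgc : g c = (cp1, c, cp2) := by rw [hg]; simp only [hcp]
      rw [hgc, show D c i = |LF c - LF i| from rfl, pyLt3_of_pyLt2_mid]
      exact hmin i hi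
    have hBrep : ∃ c ∈ cor, r_B = g c := by
      rcases foldl_min_mem3 (rest.map g) (g c0) with h | h
      · exact ⟨c0, by rw [hcoreq]; exact List.mem_cons_self, h⟩
      · rcases List.mem_map.mp h with ⟨c, hc, he⟩
        exact ⟨c, by rw [hcoreq]; exact List.mem_cons_of_mem _ hc, he.symm⟩
    have hBmin : ∀ c ∈ cor, pyLt3 (g c) r_B = false := by
      intro c hc
      rw [hcoreq] at hc
      rcases List.mem_cons.mp hc with rfl | hc
      · exact foldl_min_isMin3 (rest.map g) (g c) (g c) (Or.inl rfl)
      · exact foldl_min_isMin3 (rest.map g) (g c0) (g c) (Or.inr (List.mem_map.mpr ⟨c, hc, rfl⟩))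
    have hAmin : ∀ x : Int × Int × Int, (∃ c ∈ cor, ∃ i ∈ inc, x = (D c i, c, i)) →
        pyLt3 x r_all = false := by
      intro x hx
      exact foldl_min_isMin3 _ _ x ((htriple x).mpr hx)
    have heq : r_all = r_B := by
      obtain ⟨cB, hcB, hgB⟩ := hBrep
      obtain ⟨iB, hiB, hgiB⟩ := hrepmem cB hcB
      have hBtriple : ∃ c ∈ cor, ∃ i ∈ inc, r_B = (D c i, c, i) :=
        ⟨cB, hcB, iB, hiB, by rw [hgB, hgiB]⟩
      have h1 : pyLt3 r_B r_all = false := hAmin r_B hBtriple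
      have h2 : pyLt3 r_all r_B = false := by
        rcases foldl_min_mem3 (Pt.map (fun p => (D p.1 p.2, p.1, p.2))) (D p0.1 p0.2, p0.1, p0.2)
          with h | h
        all_goals {
          obtain ⟨c, hc, i, hi, he⟩ := (htriple r_all).mp (by rw [← hrall] at *; tauto)
          rw [he]
          exact pyLt3_false_trans _ _ _ (hrepmin c hc i hi) (hBmin c hc)
        }
      exact pyLt3_antisymm_eq r_all r_B h2 h1
    rw [← heq]
    -- ---------- final threshold check ----------
    show (match pvProj (some r_all) with
      | (none, _) => none
      | (some best, none) => some best
      | (some best, some bd) => if bd > max_diff then none else some best) =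
      (if r_all.1 ≤ max_diff then some (r_all.2.1, r_all.2.2) else none)
    show (if r_all.1 > max_diff then none else some (r_all.2.1, r_all.2.2)) =
      (if r_all.1 ≤ max_diff then some (r_all.2.1, r_all.2.2) else none)
    by_cases hcmp : r_all.1 ≤ max_diff
    · rw [if_pos hcmp, if_neg (by omega)]
    · rw [if_neg hcmp, if_pos (by omega)]

-- ===== VERDICT (by name: the statement is the Claim_ definition above) =====
theorem best_pair_spec : Claim_equal_best_pair := by
  intro responses answers gt max_diff _ _
  exact best_pair_eq responses answers gt max_diff
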